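-- pv_equiv track=rewrite | github.com/bvweerd/shelly_em3pro_emulator | tools/validate_emulator.py | registers_to_string
-- ===== SOURCE A (Python) =====
-- def registers_to_string(registers: list) -> str:
--     """Convert registers to string."""
--     result = []
--     for reg in registers:
--         high = (reg >> 8) & 0xFF
--         low = reg & 0xFF
--         if high:
--             result.append(chr(high))
--         if low:
--             result.append(chr(low))
--     return "".join(result).rstrip("\x00")
-- ===== SOURCE B (Python) =====
-- def registers_to_string(registers: list) -> str:
--     """Convert registers to string (divide-and-conquer over the register list)."""
--     def conv(regs):
--         n = len(regs)
--         if n == 0: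
--             return ''
--         if n == 1:
--             high = (regs[0] >> 8) & 0xFF
--             low = regs[0] & 0xFF
--             return (chr(high) if high else '') + (chr(low) if low else '')
--         m = n // 2
--         return conv(regs[:m]) + conv(regs[m:])
--     return conv(registers)
-- ===== Notes on version B (the rewrite author's own statement) =====
-- stated objective: alternative
-- what changed: B is a divide-and-conquer recursion: it splits the register list in halves, converts each half independently (a singleton yields its at-most-two nonzero bytes as a string) and concatenates, instead of A's linear loop that appends chars to one accumulator and rstrips trailing NULs.
import Mathlib
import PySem

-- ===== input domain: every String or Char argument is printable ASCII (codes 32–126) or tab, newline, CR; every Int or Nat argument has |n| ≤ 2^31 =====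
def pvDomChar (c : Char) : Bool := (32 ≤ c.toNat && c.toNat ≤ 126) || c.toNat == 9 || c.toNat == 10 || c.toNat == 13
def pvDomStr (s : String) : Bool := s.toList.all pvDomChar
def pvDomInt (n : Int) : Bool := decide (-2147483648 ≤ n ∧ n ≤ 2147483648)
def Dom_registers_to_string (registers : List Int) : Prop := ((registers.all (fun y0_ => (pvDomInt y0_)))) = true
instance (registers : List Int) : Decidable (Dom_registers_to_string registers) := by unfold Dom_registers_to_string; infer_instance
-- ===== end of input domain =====

-- B converts by divide-and-conquer (split the list in halves, concatenate the halves'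
-- strings; a singleton yields its nonzero bytes) instead of A's linear append loop + rstrip.

-- ===== PORT A =====
-- literal port of A: loop appending chr(high)/chr(low) when nonzero, then join + rstrip("\x00")
def registers_to_string (registers : List Int) : String :=
  let result : List Char := registers.foldl (fun acc reg =>
    let high := PySem.Int.band (reg >>> (8:Int)) 255
    let low := PySem.Int.band reg 255
    let acc := if high ≠ 0 then acc ++ [Char.ofNat high.toNat] else acc
    if low ≠ 0 then acc ++ [Char.ofNat low.toNat] else acc) []
  -- "".join(result).rstrip("\x00"): right-strip of the single char '\x00' (exact, ported by hand)
  String.ofList ((result.reverse.dropWhile (fun c => c = '\x00')).reverse)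

-- ===== PORT B =====
-- literal port of B's conv: n==0 → '', n==1 → the singleton's nonzero bytes,
-- else conv(regs[:n//2]) + conv(regs[n//2:])  (strings carried as List Char per PySem)
def pvConv : Nat → List Int → List Char
  | 0, _ => []                       -- fuel guard only; never reached when fuel ≥ length
  | fuel+1, regs =>
    let n := regs.length
    if n = 0 then []
    else if n = 1 then
      let r := regs.headD 0          -- regs[0]; in range since n = 1
      let high := PySem.Int.band (r >>> (8:Int)) 255
      let low := PySem.Int.band r 255
      (if high ≠ 0 then [Char.ofNat high.toNat] else []) ++
      (if low ≠ 0 then [Char.ofNat low.toNat] else [])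
    else
      let m := n / 2
      pvConv fuel (regs.take m) ++ pvConv fuel (regs.drop m)

def registers_to_string_alt (registers : List Int) : String :=
  String.ofList (pvConv registers.length registers)

-- ===== PRECONDITION & SPEC =====
def Spec_registers_to_string (registers : List Int) (out : String) : Prop := out = registers_to_string_alt registers
instance (registers : List Int) (out : String) : Decidable (Spec_registers_to_string registers out) := by unfold Spec_registers_to_string; infer_instance

-- ===== CLAIM (what is proved, stated in full; the proofs are below) =====
def Claim_equal_registers_to_string : Prop := ∀ (registers : List Int), Dom_registers_to_string registers → Spec_registers_to_string registers (registers_to_string registers)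

-- ===== LEMMAS AND PROOFS =====

-- a & 255 always lies in [0, 255]
theorem band255_bounds (a : Int) : 0 ≤ PySem.Int.band a 255 ∧ PySem.Int.band a 255 < 256 := by
  unfold PySem.Int.band
  split_ifs with h1 h2 h2
  · have : a.toNat &&& (255 : Int).toNat ≤ (255 : Int).toNat := Nat.and_le_right
    constructor <;> [positivity; exact_mod_cast Nat.lt_succ_of_le this]
  · omega
  · have : (255 : Int).toNat &&& (-a - 1).toNat ≤ (255 : Int).toNat := Nat.and_le_left
    omega
  · omega

theorem chr_ne_null (n : Int) (h0 : 0 < n) (h1 : n < 256) : Char.ofNat n.toNat ≠ '\x00' := by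
  intro h
  have hv : n.toNat.isValidChar := Or.inl (by omega)
  have hval : (Char.ofNat n.toNat).toNat = n.toNat := by
    rw [Char.ofNat, dif_pos hv]; rfl
  rw [h] at hval
  simp [Char.toNat] at hval
  omega

-- one register contributes exactly its nonzero bytes, as characters
def renderOne (reg : Int) : List Char :=
  (if PySem.Int.band (reg >>> (8:Int)) 255 ≠ 0 then
    [Char.ofNat (PySem.Int.band (reg >>> (8:Int)) 255).toNat] else []) ++
  (if PySem.Int.band reg 255 ≠ 0 then [Char.ofNat (PySem.Int.band reg 255).toNat] else [])

theorem foldA_eq (registers : List Int) (acc : List Char) :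
    registers.foldl (fun acc reg =>
      let high := PySem.Int.band (reg >>> (8:Int)) 255
      let low := PySem.Int.band reg 255
      let acc := if high ≠ 0 then acc ++ [Char.ofNat high.toNat] else acc
      if low ≠ 0 then acc ++ [Char.ofNat low.toNat] else acc) acc
    = acc ++ registers.flatMap renderOne := by
  have hstep : (fun (acc : List Char) (reg : Int) =>
      let high := PySem.Int.band (reg >>> (8:Int)) 255
      let low := PySem.Int.band reg 255
      let acc := if high ≠ 0 then acc ++ [Char.ofNat high.toNat] else acc
      if low ≠ 0 then acc ++ [Char.ofNat low.toNat] else acc)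
      = (fun acc reg => acc ++ renderOne reg) := by
    funext acc reg
    simp only [renderOne]
    split_ifs <;> simp_all
  rw [hstep, PySem.List.foldl_append_eq_flatMap]

theorem no_null (registers : List Int) (c : Char)
    (hc : c ∈ registers.flatMap renderOne) : c ≠ '\x00' := by
  simp only [List.mem_flatMap, renderOne, List.mem_append] at hc
  obtain ⟨r, -, hc⟩ := hc
  rcases hc with hc | hc <;> rw [List.mem_ite_nil_right] at hc <;>
    obtain ⟨hne, hc⟩ := hc <;> simp only [List.mem_singleton] at hc <;> subst hc
  · have := band255_bounds (r >>> (8:Int))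
    exact chr_ne_null _ (by omega) this.2
  · have := band255_bounds r
    exact chr_ne_null _ (by omega) this.2

theorem dropWhile_null_id (l : List Char) (h : ∀ c ∈ l, c ≠ '\x00') :
    l.dropWhile (fun c => c = '\x00') = l := by
  rw [List.dropWhile_eq_self_iff]
  intro hl
  simpa using h l[0] (List.getElem_mem hl)

-- B's divide-and-conquer computes the flatMap of per-register renderings
theorem pvConv_eq : ∀ (fuel : Nat) (regs : List Int), regs.length ≤ fuel →
    pvConv fuel regs = regs.flatMap renderOne := by
  intro fuel
  induction fuel with
  | zero =>
    intro regs h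
    have : regs = [] := List.eq_nil_of_length_eq_zero (by omega)
    subst this; rfl
  | succ k ih =>
    intro regs h
    rw [pvConv]
    by_cases h0 : regs.length = 0
    · have : regs = [] := List.eq_nil_of_length_eq_zero h0
      subst this; rfl
    · by_cases h1 : regs.length = 1
      · obtain ⟨r, hr⟩ : ∃ r, regs = [r] := List.length_eq_one_iff.mp h1
        subst hr
        simp [renderOne]
      · simp only [if_neg h0, if_neg h1]
        have hm1 : 1 ≤ regs.length / 2 := by omega
        have hm2 : regs.length / 2 < regs.length := by omega
        rw [ih (regs.take (regs.length / 2)) (by simp; omega),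
            ih (regs.drop (regs.length / 2)) (by simp; omega),
            ← List.flatMap_append, List.take_append_drop]

-- ===== VERDICT (by name: the statement is the Claim_ definition above) =====
theorem registers_to_string_spec : Claim_equal_registers_to_string := by
  intro registers _
  unfold Spec_registers_to_string registers_to_string registers_to_string_alt
  rw [foldA_eq]
  simp only [List.nil_append]
  rw [dropWhile_null_id _ (fun c hc => no_null registers c (by simpa using hc))]
  simp only [List.reverse_reverse]
  rw [pvConv_eq registers.length registers le_rfl]
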